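-- pv_equiv track=rewrite | github.com/faisal-islam-tfs/DocAtlas | docatlas.py | path_compare_aliases
-- ===== SOURCE A (Python) =====
-- def normalize_compare_path(value: str) -> str:
--     return str(value or "").strip().replace("\\", "/").casefold()
--
-- def path_compare_aliases(value: str) -> set[str]:
--     norm = normalize_compare_path(value)
--     if not norm:
--         return set()
--     parts = [p for p in norm.split("/") if p]
--     aliases = {norm}
--     for idx in range(len(parts)):
--         aliases.add("/".join(parts[idx:]))
--     return aliases
-- ===== SOURCE B (Python) =====
-- def path_compare_aliases(value: str) -> set[str]:
--     norm = str(value or "").strip().replace("\\", "/").casefold()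
--     if not norm:
--         return set()
--     # build all path suffixes in one reverse pass with a running accumulator,
--     # instead of re-slicing and re-joining the parts list for every index
--     rev_suffixes = []
--     suffix = ""
--     for p in reversed(norm.split("/")):
--         if not p:
--             continue
--         suffix = p if not suffix else p + "/" + suffix
--         rev_suffixes.append(suffix)
--     aliases = {norm}
--     for s in reversed(rev_suffixes):
--         aliases.add(s)
--     return aliases
-- ===== Notes on version B (the rewrite author's own statement) =====
-- stated objective: alternative
-- what changed: Instead of re-slicing the parts list from each index and re-joining it with the separator for every index, B makes one reverse pass over the split parts maintaining a running suffix accumulator, collects the suffixes, and inserts them in the same (longest-first) order after norm.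
import Mathlib
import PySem

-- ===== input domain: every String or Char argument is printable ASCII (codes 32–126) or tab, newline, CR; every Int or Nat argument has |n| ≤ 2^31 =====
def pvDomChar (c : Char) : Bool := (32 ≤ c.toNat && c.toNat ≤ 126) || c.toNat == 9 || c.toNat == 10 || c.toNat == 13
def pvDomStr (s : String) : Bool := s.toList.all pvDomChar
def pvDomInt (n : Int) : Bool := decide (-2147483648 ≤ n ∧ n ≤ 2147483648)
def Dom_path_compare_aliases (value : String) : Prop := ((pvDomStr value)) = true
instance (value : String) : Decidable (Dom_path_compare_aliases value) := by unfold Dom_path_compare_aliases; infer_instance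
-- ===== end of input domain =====

-- B replaces A's per-index slice-and-rejoin of the parts list by a single reverse pass
-- with a running suffix accumulator (alternative decomposition, same result set).


-- ===== PORT A =====
-- 'str(value or "")' is the identity on every str input ('' stays ''), so it is omitted;
-- casefold is ported as PySem.Str.lower (exact on the ASCII domain Dom).
def normalize_compare_path (value : String) : String :=
  PySem.Str.lower (PySem.Str.replace (PySem.Str.strip value) "\\" "/")

def path_compare_aliases (value : String) : List String :=
  let norm := normalize_compare_path value
  if norm = "" then PySem.Set.empty
  else
    let parts := ((PySem.Str.split? norm "/").getD []).filter (fun p => decide (p ≠ ""))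
    (PySem.List.pyRange 0 (parts.length : Int) 1).foldl
      (fun aliases idx =>
        PySem.Set.add aliases (PySem.Str.join "/" (PySem.List.slice parts (some idx) none)))
      (PySem.Set.ofList [norm])

-- ===== PORT B =====
def path_compare_aliases_alt (value : String) : List String :=
  let norm := PySem.Str.lower (PySem.Str.replace (PySem.Str.strip value) "\\" "/")
  if norm = "" then PySem.Set.empty
  else
    -- one reverse pass: running suffix accumulator, collected shortest-first
    let st := ((PySem.Str.split? norm "/").getD []).reverse.foldl
      (fun (st : String × List String) p =>
        if p = "" then st
        else
          let suffix := if st.1 = "" then p else p ++ "/" ++ st.1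
          (suffix, st.2 ++ [suffix]))
      ("", [])
    st.2.reverse.foldl (fun aliases s => PySem.Set.add aliases s) (PySem.Set.ofList [norm])

-- ===== PRECONDITION & SPEC =====
def Spec_path_compare_aliases (value : String) (out : List String) : Prop := out = path_compare_aliases_alt value
instance (value : String) (out : List String) : Decidable (Spec_path_compare_aliases value out) := by unfold Spec_path_compare_aliases; infer_instance

-- ===== CLAIM (what is proved, stated in full; the proofs are below) =====
def Claim_equal_path_compare_aliases : Prop := ∀ (value : String), Dom_path_compare_aliases value → Spec_path_compare_aliases value (path_compare_aliases value)

-- ===== LEMMAS AND PROOFS =====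

-- the list of suffix joins A produces, longest first
def pvDrops (L : List String) : List String :=
  (List.range L.length).map (fun k => PySem.Str.join "/" (L.drop k))

theorem pv_join_nil : PySem.Str.join "/" [] = "" := by decide

theorem pv_join_singleton (p : String) : PySem.Str.join "/" [p] = p := by
  rw [← String.toList_inj]
  simp [PySem.Str.toList_join, PySem.Chars.join_singleton]

theorem pv_join_cons_cons (p q : String) (r : List String) :
    PySem.Str.join "/" (p :: q :: r) = p ++ "/" ++ PySem.Str.join "/" (q :: r) := by
  rw [← String.toList_inj]
  simp [PySem.Str.toList_join, PySem.Chars.join_cons_cons]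

theorem pv_join_ne_empty (q : String) (hq : q ≠ "") (r : List String) :
    PySem.Str.join "/" (q :: r) ≠ "" := by
  match r with
  | [] =>
    rw [pv_join_singleton]
    exact hq
  | s :: t =>
    rw [pv_join_cons_cons]
    intro hc
    rw [← String.toList_inj] at hc
    simp at hc

-- B's skip-empties loop over any list equals the plain loop over the filtered list
theorem pv_skip_eq_filter (l : List String) (st : String × List String) :
    l.foldl
      (fun (st : String × List String) p =>
        if p = "" then st
        else
          let suffix := if st.1 = "" then p else p ++ "/" ++ st.1
          (suffix, st.2 ++ [suffix])) st
    = (l.filter (fun p => decide (p ≠ ""))).foldl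
      (fun (st : String × List String) p =>
        let suffix := if st.1 = "" then p else p ++ "/" ++ st.1
        (suffix, st.2 ++ [suffix])) st := by
  induction l generalizing st with
  | nil => rfl
  | cons p l ih =>
    by_cases hp : p = "" <;> simp [hp, ih]

-- the core invariant of B's reverse accumulation
theorem pv_core (L : List String) (hL : ∀ p ∈ L, p ≠ "") :
    L.reverse.foldl
      (fun (st : String × List String) p =>
        let suffix := if st.1 = "" then p else p ++ "/" ++ st.1
        (suffix, st.2 ++ [suffix])) ("", [])
    = (PySem.Str.join "/" L, (pvDrops L).reverse) := by
  rw [List.foldl_reverse]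
  induction L with
  | nil => simp [pvDrops, pv_join_nil]
  | cons p L ih =>
    have hp : p ≠ "" := hL p (by simp)
    have ih' := ih (fun q hq => hL q (by simp [hq]))
    rw [List.foldr_cons, ih']
    have hdrops : pvDrops (p :: L) = PySem.Str.join "/" (p :: L) :: pvDrops L := by
      simp [pvDrops, List.range_succ_eq_map, List.map_map, Function.comp_def]
    match L with
    | [] =>
      simp [pv_join_nil, pv_join_singleton, pvDrops]
    | q :: r =>
      have hne := pv_join_ne_empty q (hL q (by simp)) r
      simp only [hne, hdrops]
      simp [pv_join_cons_cons]

-- A's fold over pyRange of indices is the plain fold of Set.add over pvDrops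
theorem pv_a_fold (parts : List String) (init : List String) :
    (PySem.List.pyRange 0 (parts.length : Int) 1).foldl
      (fun aliases idx =>
        PySem.Set.add aliases (PySem.Str.join "/" (PySem.List.slice parts (some idx) none))) init
    = (pvDrops parts).foldl (fun aliases s => PySem.Set.add aliases s) init := by
  rw [PySem.List.pyRange_one, List.foldl_map]
  unfold pvDrops
  rw [List.foldl_map]
  have hn : ((parts.length : Int) - 0).toNat = parts.length := by simp
  rw [hn]
  congr 1
  funext al k
  simp [PySem.List.slice_from_natCast]

-- ===== VERDICT (by name: the statement is the Claim_ definition above) =====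
theorem path_compare_aliases_spec : Claim_equal_path_compare_aliases := by
  intro value _
  unfold Spec_path_compare_aliases path_compare_aliases path_compare_aliases_alt
    normalize_compare_path
  set norm := PySem.Str.lower (PySem.Str.replace (PySem.Str.strip value) "\\" "/") with hn
  by_cases h : norm = ""
  · simp [h]
  · simp only [h]
    set S := (PySem.Str.split? norm "/").getD [] with hS
    rw [pv_a_fold, pv_skip_eq_filter, List.filter_reverse, pv_core]
    · simp
    · intro p hp
      simpa using (List.mem_filter.mp hp).2
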